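-- pv_equiv track=rewrite | github.com/Maxd646/LeetCode-Tracker | leetcode-solutions/ pro 356-line-refiliction/solution.py | isReflected
-- ===== SOURCE A (Python) =====
-- def isReflected(points: list[list[int]]) -> bool:
--     maxx, minx=-float("inf"), float("inf")
--     seen=set()
--     for x, y in points:
--         maxx=max(maxx, x)
--         minx=min(minx, x)
--         seen.add((x, y))
--     mid=(maxx+minx)
--     return all((mid-x, y) in seen for x, y in points)
-- ===== SOURCE B (Python) =====
-- def isReflected(points: list[list[int]]) -> bool:
--     if not points:
--         return True
--     target = min(p[0] for p in points) + max(p[0] for p in points)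
--     groups = {}
--     for x, y in points:
--         groups.setdefault(y, set()).add(x)
--     for s in groups.values():
--         xs = sorted(s)
--         lo, hi = 0, len(xs) - 1
--         while lo <= hi:
--             if xs[lo] + xs[hi] != target:
--                 return False
--             lo += 1
--             hi -= 1
--     return True
-- ===== Notes on version B (the rewrite author's own statement) =====
-- stated objective: alternative
-- what changed: Instead of A's single hash-set of all (x,y) pairs probed once per point, B groups the distinct x values per y-coordinate in a dict of sets and verifies each group with a sorted two-pointer sweep against the global axis value minx+maxx.
import Mathlib
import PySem

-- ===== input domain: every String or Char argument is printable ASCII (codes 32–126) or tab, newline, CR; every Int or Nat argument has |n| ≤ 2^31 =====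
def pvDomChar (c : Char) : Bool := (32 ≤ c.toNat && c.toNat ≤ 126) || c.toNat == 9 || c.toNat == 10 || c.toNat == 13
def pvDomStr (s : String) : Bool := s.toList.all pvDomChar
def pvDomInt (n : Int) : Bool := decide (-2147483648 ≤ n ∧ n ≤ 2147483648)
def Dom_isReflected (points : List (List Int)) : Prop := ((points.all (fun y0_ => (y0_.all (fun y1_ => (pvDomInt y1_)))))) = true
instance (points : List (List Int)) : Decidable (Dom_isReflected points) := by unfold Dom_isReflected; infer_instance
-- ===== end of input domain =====

-- B groups the distinct x's per y-coordinate and checks each group with a sorted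
-- two-pointer sweep against the global axis minx+maxx, instead of A's global
-- hash-set membership probe per point (alternative algorithm, not claimed faster).

-- ===== PORT A =====
def pvStepA (st : Option Int × Option Int × PySem.Set (Int × Int)) (p : List Int) :
    Option Int × Option Int × PySem.Set (Int × Int) :=
  let x := p.headD 0
  let y := (p.drop 1).headD 0
  (some (match st.1 with | none => x | some m => max m x),
   some (match st.2.1 with | none => x | some m => min m x),
   PySem.Set.add st.2.2 (x, y))

def isReflected (points : List (List Int)) : Bool :=
  let st := points.foldl pvStepA (none, none, PySem.Set.empty)
  let mid := st.1.getD 0 + st.2.1.getD 0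
  points.all (fun p =>
    PySem.Set.contains st.2.2 (mid - p.headD 0, (p.drop 1).headD 0))

-- ===== PORT B =====
def pvTwoPtr (t : Int) : List Int → Bool
  | [] => true
  | x :: rest =>
    if x + rest.getLastD x ≠ t then false
    else pvTwoPtr t rest.dropLast
termination_by l => l.length
decreasing_by simp

def isReflected_alt (points : List (List Int)) : Bool :=
  if points.isEmpty then true
  else
    let xs := points.map (fun p => p.headD 0)
    let target := (PySem.List.min? xs (fun v => v)).getD 0 +
                  (PySem.List.max? xs (fun v => v)).getD 0
    let groups := points.foldl
      (fun (d : PySem.Dict Int (PySem.Set Int)) p =>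
        d.modify ((p.drop 1).headD 0) PySem.Set.empty (fun s => PySem.Set.add s (p.headD 0)))
      PySem.Dict.empty
    (PySem.Dict.values groups).all (fun s =>
      pvTwoPtr target (PySem.List.sorted s (fun v => v) false))

-- ===== PRECONDITION & SPEC =====
-- Pre_ excludes exactly the inputs where A raises: an inner list whose length is
-- not 2 makes the unpacking 'for x, y in points' raise ValueError.
def Pre_isReflected (points : List (List Int)) : Prop := ∀ p ∈ points, p.length = 2
instance (points : List (List Int)) : Decidable (Pre_isReflected points) := by
  unfold Pre_isReflected; infer_instance

def pvWitness_isReflected : List (List Int) := [[1, 0], [-1, 0]]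

def Spec_isReflected (points : List (List Int)) (out : Bool) : Prop := out = isReflected_alt points
instance (points : List (List Int)) (out : Bool) : Decidable (Spec_isReflected points out) := by
  unfold Spec_isReflected; infer_instance

-- ===== CLAIM (what is proved, stated in full; the proofs are below) =====
def Claim_equal_isReflected : Prop := ∀ (points : List (List Int)), Dom_isReflected points → Pre_isReflected points → Spec_isReflected points (isReflected points)


-- ===== LEMMAS AND PROOFS =====

-- Characterisation of the two-pointer sweep: it succeeds iff the list is the
-- reverse of its image under x ↦ t - x.
theorem pvTwoPtr_iff_rev (t : Int) :
    ∀ (n : Nat) (l : List Int), l.length ≤ n →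
      (pvTwoPtr t l = true ↔ (l.map (fun x => t - x)).reverse = l) := by
  intro n
  induction n with
  | zero =>
    intro l h
    have hl : l = [] := by cases l <;> simp_all
    subst hl; simp [pvTwoPtr]
  | succ n ih =>
    intro l h
    match l with
    | [] => simp [pvTwoPtr]
    | x :: rest =>
      by_cases hr : rest = []
      · subst hr
        simp only [pvTwoPtr, List.getLastD_nil, List.dropLast_nil]
        split_ifs with hc
        · simp; intro he; omega
        · simp; omega
      · obtain ⟨mid, y, hmy⟩ : ∃ mid y, rest = mid ++ [y] :=
          ⟨rest.dropLast, rest.getLast hr, (List.dropLast_append_getLast hr).symm⟩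
        subst hmy
        have hlen : mid.length ≤ n := by simp at h; omega
        have IH := ih mid hlen
        have hstep : pvTwoPtr t (x :: (mid ++ [y])) =
            if x + y ≠ t then false else pvTwoPtr t mid := by
          simp only [pvTwoPtr, List.getLastD_concat, List.dropLast_concat]
        have hrhs : (((x :: (mid ++ [y])).map (fun z => t - z)).reverse = x :: (mid ++ [y])) ↔
            (x + y = t ∧ (mid.map (fun z => t - z)).reverse = mid) := by
          simp only [List.map_cons, List.map_append, List.reverse_cons, List.reverse_append]
          constructor
          · intro hEq
            have h0 : t - y = x ∧ (mid.map (fun z => t - z)).reverse ++ [t - x] = mid ++ [y] := by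
              simpa [List.cons.injEq] using hEq
            obtain ⟨h1, h2⟩ := h0
            rw [← List.concat_eq_append, ← List.concat_eq_append, List.concat_inj] at h2
            exact ⟨by omega, h2.1⟩
          · intro ⟨h1, h2⟩
            have hx : t - y = x := by omega
            have hy : t - x = y := by omega
            simp [hx, hy, h2]
        rw [hstep, hrhs]
        split_ifs with hc
        · simp; intro he; omega
        · rw [IH]; simp; omega

-- On a strictly increasing list, that condition is exactly closure under x ↦ t - x.
theorem pvRev_iff_closed (t : Int) (l : List Int) (hs : l.Pairwise (· < ·)) :
    ((l.map (fun x => t - x)).reverse = l) ↔ (∀ x ∈ l, t - x ∈ l) := by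
  constructor
  · intro h x hx
    rw [← h]
    simp only [List.mem_reverse, List.mem_map]
    exact ⟨x, hx, rfl⟩
  · intro hcl
    have hnd : l.Nodup := hs.imp (fun h => ne_of_lt h)
    have hnd' : ((l.map (fun x => t - x)).reverse).Nodup := by
      rw [List.nodup_reverse]
      exact hnd.map (fun a b hab => by omega)
    have hs' : ((l.map (fun x => t - x)).reverse).Pairwise (· < ·) := by
      rw [List.pairwise_reverse, List.pairwise_map]
      exact hs.imp (fun h => by omega)
    have hmem : ∀ z, z ∈ (l.map (fun x => t - x)).reverse ↔ z ∈ l := by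
      intro z
      simp only [List.mem_reverse, List.mem_map]
      constructor
      · rintro ⟨w, hw, rfl⟩; exact hcl w hw
      · intro hz; exact ⟨t - z, hcl z hz, by omega⟩
    have hperm : ((l.map (fun x => t - x)).reverse).Perm l :=
      (List.perm_ext_iff_of_nodup hnd' hnd).2 hmem
    exact List.Perm.eq_of_pairwise
      (fun a b _ _ h1 h2 => absurd h1 (lt_asymm h2)) hs' hs hperm

-- A's fold: the set component collects all (x, y) pairs.
theorem pvFoldA_seen : ∀ (points : List (List Int)) (st : Option Int × Option Int × PySem.Set (Int × Int)),
    (points.foldl pvStepA st).2.2 =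
      PySem.Set.update st.2.2 (points.map (fun p => (p.headD 0, (p.drop 1).headD 0))) := by
  intro points
  induction points with
  | nil => intro st; simp [PySem.Set.update_nil]
  | cons p ps ih =>
    intro st
    rw [List.foldl_cons, ih]
    simp only [List.map_cons, PySem.Set.update_cons]
    rfl

-- A's fold: the running max component.
theorem pvFoldA_max : ∀ (points : List (List Int)) (m : Int) (b : Option Int) (s : PySem.Set (Int × Int)),
    (points.foldl pvStepA (some m, b, s)).1 =
      some ((points.map (fun p => p.headD 0)).foldl max m) := by
  intro points
  induction points with
  | nil => intro m b s; rfl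
  | cons p ps ih => intro m b s; rw [List.foldl_cons]; exact ih _ _ _

-- A's fold: the running min component.
theorem pvFoldA_min : ∀ (points : List (List Int)) (a : Option Int) (m : Int) (s : PySem.Set (Int × Int)),
    (points.foldl pvStepA (a, some m, s)).2.1 =
      some ((points.map (fun p => p.headD 0)).foldl min m) := by
  intro points
  induction points with
  | nil => intro a m s; rfl
  | cons p ps ih => intro a m s; rw [List.foldl_cons]; exact ih _ _ _

-- B's grouping fold: the set stored at key y collects the x's of the points with that y.
theorem pvFoldG_getD : ∀ (L : List (List Int)) (d : PySem.Dict Int (PySem.Set Int)) (y : Int),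
    (L.foldl (fun d p => d.modify ((p.drop 1).headD 0) PySem.Set.empty
        (fun s => PySem.Set.add s (p.headD 0))) d).getD y PySem.Set.empty =
      PySem.Set.update (d.getD y PySem.Set.empty)
        ((L.filter (fun p => (p.drop 1).headD 0 == y)).map (fun p => p.headD 0)) := by
  intro L
  induction L with
  | nil => intro d y; simp [PySem.Set.update_nil]
  | cons p ps ih =>
    intro d y
    rw [List.foldl_cons, ih]
    by_cases hy : (p.drop 1).headD 0 = y
    · rw [hy, PySem.Dict.getD_modify_self]
      have hy' : p[1]?.getD 0 = y := by simpa using hy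
      simp [hy', PySem.Set.update_cons]
    · have hne : y ≠ (p.drop 1).headD 0 := fun h => hy h.symm
      rw [PySem.Dict.getD_modify_of_ne _ _ _ hne]
      have hy' : ¬ p[1]?.getD 0 = y := by simpa using hy
      simp [hy']

-- the pair (a, b) occurs among the points iff a occurs among the x's grouped at y = b
theorem pvMemPairs (points : List (List Int)) (a b : Int) :
    ((a, b) ∈ points.map (fun p => (p.headD 0, (p.drop 1).headD 0))) ↔
      a ∈ (points.filter (fun p => (p.drop 1).headD 0 == b)).map (fun p => p.headD 0) := by
  simp only [List.mem_map, List.mem_filter, beq_iff_eq, Prod.mk.injEq]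
  constructor
  · rintro ⟨p, hp, hpa, hpb⟩; exact ⟨p, ⟨hp, hpb⟩, hpa⟩
  · rintro ⟨p, ⟨hp, hpb⟩, hpa⟩; exact ⟨p, hp, hpa, hpb⟩

-- per-group check, fully reduced: two-pointer on sorted distinct x's ↔ closure of the x-list
theorem pvGroupCheck (t : Int) (xs : List Int) :
    (pvTwoPtr t (PySem.List.sorted (PySem.Set.ofList xs) (fun v => v) false) = true) ↔
      (∀ x ∈ xs, t - x ∈ xs) := by
  set l := PySem.List.sorted (PySem.Set.ofList xs) (fun v => v) false with hl
  have hs : l.Pairwise (· < ·) := PySem.List.sorted_ofList_pairwise_lt xs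
  rw [pvTwoPtr_iff_rev t l.length l le_rfl, pvRev_iff_closed t l hs]
  have hmem : ∀ z, z ∈ l ↔ z ∈ xs := by
    intro z
    rw [hl, PySem.List.mem_sorted, PySem.Set.mem_ofList]
  constructor
  · intro h x hx
    exact (hmem _).1 (h x ((hmem x).2 hx))
  · intro h x hx
    exact (hmem _).2 (h x ((hmem x).1 hx))

-- ===== VERDICT (by name: the statement is the Claim_ definition above) =====
theorem isReflected_spec : Claim_equal_isReflected := by
  intro points _ _
  unfold Spec_isReflected
  cases points with
  | nil => rfl
  | cons p ps =>
    rw [Bool.eq_iff_iff]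
    -- abbreviations
    set M := (ps.map (fun q => q.headD 0)).foldl max (p.headD 0) with hM
    set m := (ps.map (fun q => q.headD 0)).foldl min (p.headD 0) with hm
    -- A's fold result
    have hfold : (p :: ps).foldl pvStepA (none, none, PySem.Set.empty) =
        (some M, some m,
          PySem.Set.ofList ((p :: ps).map (fun q => (q.headD 0, (q.drop 1).headD 0)))) := by
      rw [List.foldl_cons]
      refine Prod.ext ?_ (Prod.ext ?_ ?_)
      · exact pvFoldA_max ps (p.headD 0) _ _
      · exact pvFoldA_min ps _ (p.headD 0) _
      · rw [pvFoldA_seen]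
        rfl
    -- A characterised
    have hA : (isReflected (p :: ps) = true) ↔
        (∀ q ∈ p :: ps, ((M + m - q.headD 0, (q.drop 1).headD 0) ∈
          (p :: ps).map (fun r => (r.headD 0, (r.drop 1).headD 0)))) := by
      simp only [isReflected, hfold, Option.getD_some, List.all_eq_true]
      constructor
      · intro h q hq
        have := h q hq
        rw [PySem.Set.contains_iff, PySem.Set.mem_ofList] at this
        exact this
      · intro h q hq
        rw [PySem.Set.contains_iff, PySem.Set.mem_ofList]
        exact h q hq
    -- B's grouping dict
    set groups := (p :: ps).foldl
      (fun (d : PySem.Dict Int (PySem.Set Int)) q =>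
        d.modify ((q.drop 1).headD 0) PySem.Set.empty (fun s => PySem.Set.add s (q.headD 0)))
      PySem.Dict.empty with hgroups
    have hkeys : groups.keys =
        PySem.Set.ofList ((p :: ps).map (fun q => (q.drop 1).headD 0)) := by
      rw [hgroups]
      have := PySem.Dict.keys_foldl_modify_key (p :: ps)
        (fun q => (q.drop 1).headD 0) PySem.Set.empty
        (fun _ q s => PySem.Set.add s (q.headD 0)) PySem.Dict.empty
      rw [this, PySem.Dict.keys_empty, PySem.Set.update_nil_left]
    have hnodup : groups.keys.Nodup := by
      rw [hkeys]; exact PySem.Set.nodup_ofList _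
    have hgetD : ∀ y, groups.getD y PySem.Set.empty =
        PySem.Set.ofList (((p :: ps).filter (fun q => (q.drop 1).headD 0 == y)).map
          (fun q => q.headD 0)) := by
      intro y
      rw [hgroups, pvFoldG_getD, PySem.Dict.getD_empty, PySem.Set.update_empty]
    -- B characterised
    have hB : (isReflected_alt (p :: ps) = true) ↔
        (∀ y ∈ (p :: ps).map (fun q => (q.drop 1).headD 0),
          ∀ x ∈ ((p :: ps).filter (fun q => (q.drop 1).headD 0 == y)).map (fun q => q.headD 0),
            M + m - x ∈
              ((p :: ps).filter (fun q => (q.drop 1).headD 0 == y)).map (fun q => q.headD 0)) := by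
      simp only [isReflected_alt, List.isEmpty_cons, Bool.false_eq_true, if_false,
        List.map_cons, PySem.List.min?_id_cons, PySem.List.max?_id_cons, Option.getD_some,
        ← hM, ← hm, ← hgroups]
      rw [PySem.Dict.values_eq_map_keys groups hnodup PySem.Set.empty, hkeys]
      rw [List.all_map, List.all_eq_true]
      have hsame : ∀ y, y ∈ PySem.Set.ofList ((p :: ps).map (fun q => (q.drop 1).headD 0)) ↔
          y ∈ (p :: ps).map (fun q => (q.drop 1).headD 0) := fun y => PySem.Set.mem_ofList _ _
      constructor
      · intro h y hy
        have := h y ((hsame y).2 hy)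
        rw [Function.comp_apply, hgetD y] at this
        have := (pvGroupCheck (m + M) _).1 this
        intro x hx
        have hmm : M + m - x = m + M - x := by omega
        rw [hmm]
        exact this x hx
      · intro h y hy
        rw [Function.comp_apply, hgetD y]
        rw [pvGroupCheck (m + M) _]
        intro x hx
        have hmm : m + M - x = M + m - x := by omega
        rw [hmm]
        exact h y ((hsame y).1 hy) x hx
    rw [hA, hB]
    constructor
    · intro h y hy x hx
      have hpair : (x, y) ∈ (p :: ps).map (fun r => (r.headD 0, (r.drop 1).headD 0)) :=
        (pvMemPairs (p :: ps) x y).2 hx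
      obtain ⟨q, hq, hqe⟩ := List.mem_map.1 hpair
      have hx' : q.headD 0 = x := (Prod.mk.injEq _ _ _ _ ▸ hqe).1
      have hy' : (q.drop 1).headD 0 = y := (Prod.mk.injEq _ _ _ _ ▸ hqe).2
      have := h q hq
      rw [hx', hy'] at this
      exact (pvMemPairs (p :: ps) (M + m - x) y).1 this
    · intro h q hq
      have hy : (q.drop 1).headD 0 ∈ (p :: ps).map (fun r => (r.drop 1).headD 0) :=
        List.mem_map.2 ⟨q, hq, rfl⟩
      have hx : q.headD 0 ∈
          ((p :: ps).filter (fun r => (r.drop 1).headD 0 == (q.drop 1).headD 0)).map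
            (fun r => r.headD 0) :=
        (pvMemPairs (p :: ps) (q.headD 0) ((q.drop 1).headD 0)).1 (List.mem_map.2 ⟨q, hq, rfl⟩)
      exact (pvMemPairs (p :: ps) _ _).2 (h _ hy _ hx)
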